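-- pv_equiv track=rewrite | github.com/vashwar/GmailAssistant | triage_engine.py | format_category_view
-- ===== SOURCE A (Python) =====
-- def format_category_view(scored_emails):
--     """Render scored emails grouped by category."""
--     # Group by category
--     cat_groups = {}
--     for email in scored_emails:
--         cat = email.get("category", "Misc")
--         cat_groups.setdefault(cat, []).append(email)
--
--     # Sort categories alphabetically, but "Misc" last
--     sorted_cats = sorted(cat_groups.keys(), key=lambda c: (c == "Misc", c))
--
--     lines = []
--     lines.append("")
--     lines.append("=" * 62)
--     lines.append(f"  INBOX BY CATEGORY  —  {len(scored_emails)} emails in {len(cat_groups)} categories")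
--     lines.append("=" * 62)
--
--     for cat in sorted_cats:
--         emails = cat_groups[cat]
--         lines.append("")
--         lines.append(f"  [{cat}] ({len(emails)})")
--         lines.append(f"  {'─' * 40}")
--
--         for email in emails:
--             subj = email.get("subject", "(no subject)")
--             if len(subj) > 50:
--                 subj = subj[:47] + "..."
--             sender = email.get("from", "")
--             pri = email.get("priority", "LOW")
--             lines.append(f"    {pri:<6} {sender}")
--             lines.append(f"           {subj}")
--
--     lines.append("")
--     lines.append("=" * 62)
--
--     return "\n".join(lines)
-- ===== SOURCE B (Python) =====
-- def format_category_view(scored_emails):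
--     """Render scored emails grouped by category without building a dict of
--     groups: ordered dedup of the categories, then one filter pass per
--     sorted category, each section produced by a helper."""
--     def cat_of(e):
--         return e.get("category", "Misc")
--
--     def email_block(e):
--         s = e.get("subject", "(no subject)")
--         subj = s if len(s) <= 50 else s[:47] + "..."
--         return ["    %-6s %s" % (e.get("priority", "LOW"), e.get("from", "")),
--                 "           " + subj]
--
--     def section(c):
--         grp = [e for e in scored_emails if cat_of(e) == c]
--         return (["", "  [%s] (%d)" % (c, len(grp)), "  " + "\u2500" * 40]
--                 + [ln for e in grp for ln in email_block(e)])
--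
--     cats = list(dict.fromkeys(cat_of(e) for e in scored_emails))
--     rule = "=" * 62
--     out = ["", rule,
--            "  INBOX BY CATEGORY  \u2014  %d emails in %d categories"
--            % (len(scored_emails), len(cats)),
--            rule]
--     for c in sorted(cats, key=lambda c: (c == "Misc", c)):
--         out += section(c)
--     return "\n".join(out + ["", rule])
-- ===== Notes on version B (the rewrite author's own statement) =====
-- stated objective: alternative
-- what changed: Replaces A's single-pass dict-of-lists grouping (setdefault/append, then sorting the dict keys and appending lines in nested loops) by an ordered dedup of the category list followed by one filter pass per sorted category, each section emitted by a helper as a flat comprehension.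
import Mathlib
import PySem

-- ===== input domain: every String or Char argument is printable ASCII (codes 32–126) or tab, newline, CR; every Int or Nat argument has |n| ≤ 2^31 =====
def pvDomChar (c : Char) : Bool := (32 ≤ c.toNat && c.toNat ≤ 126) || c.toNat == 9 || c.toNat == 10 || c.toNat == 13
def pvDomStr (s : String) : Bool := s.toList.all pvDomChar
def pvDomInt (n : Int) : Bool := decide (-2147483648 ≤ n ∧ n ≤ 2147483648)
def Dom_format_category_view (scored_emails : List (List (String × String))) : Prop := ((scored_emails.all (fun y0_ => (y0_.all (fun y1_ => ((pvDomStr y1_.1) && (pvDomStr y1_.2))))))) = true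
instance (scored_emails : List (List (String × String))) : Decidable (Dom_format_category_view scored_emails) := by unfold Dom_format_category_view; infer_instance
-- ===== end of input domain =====

-- B replaces A's one-pass dict-of-lists grouping by an ordered dedup of the categories plus
-- one filter pass per sorted category, sections built as flat comprehensions (objective: alternative).


-- ===== PORT A =====
-- A, step for step: group into a dict (cat_groups.setdefault(cat, []).append(email) =
-- modify cat [] (· ++ [email])), sort the keys with "Misc" last, then append lines
-- category by category and email by email into one growing `lines` accumulator.
def format_category_view (scored_emails : List (List (String × String))) : String :=
  let cat_groups : PySem.Dict String (List (List (String × String))) :=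
    scored_emails.foldl (fun d email =>
      d.modify (PySem.Dict.getD (PySem.Dict.mk email) "category" "Misc") []
        (fun g => g ++ [email])) PySem.Dict.empty
  let sorted_cats := PySem.List.sorted2 cat_groups.keys (fun c => c == "Misc") (fun c => c)
  let bar := String.ofList (List.replicate 62 '=')          -- "=" * 62
  let lines : List String :=
    ["", bar,
     "  INBOX BY CATEGORY  —  " ++ PySem.Int.toStr (scored_emails.length : Int) ++
       " emails in " ++ PySem.Int.toStr (cat_groups.size : Int) ++ " categories",
     bar]
  let lines := sorted_cats.foldl (fun ls cat =>
    let emails := cat_groups.getD cat []                    -- cat_groups[cat]; cat is a key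
    let ls := ls ++ ["", "  [" ++ cat ++ "] (" ++ PySem.Int.toStr (emails.length : Int) ++ ")",
                     "  " ++ String.ofList (List.replicate 40 '─')]
    emails.foldl (fun ls email =>
      let subj := PySem.Dict.getD (PySem.Dict.mk email) "subject" "(no subject)"
      let subj := if 50 < PySem.Str.len subj
                  then PySem.Str.slice subj none (some 47) ++ "..." else subj
      let sender := PySem.Dict.getD (PySem.Dict.mk email) "from" ""
      let pri := PySem.Dict.getD (PySem.Dict.mk email) "priority" "LOW"
      -- f"{pri:<6}": pad with spaces on the right when len(pri) < 6 (exact: Nat '-' clamps)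
      ls ++ ["    " ++ (pri ++ String.ofList (List.replicate (6 - pri.toList.length) ' ')) ++
               " " ++ sender,
             "           " ++ subj]) ls) lines
  PySem.Str.join "\n" (lines ++ ["", bar])

-- ===== PORT B =====
-- B-side helpers (Source B's inner functions; `scored_emails` passed explicitly)

-- cat_of(e)
def bCatOf (e : List (String × String)) : String :=
  PySem.Dict.getD (PySem.Dict.mk e) "category" "Misc"

-- email_block(e): the two lines for one email ("%-6s" pads on the right to width 6)
def bEmailBlock (e : List (String × String)) : List String :=
  let s := PySem.Dict.getD (PySem.Dict.mk e) "subject" "(no subject)"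
  let subj := if PySem.Str.len s ≤ 50 then s
              else PySem.Str.slice s none (some 47) ++ "..."
  ["    " ++ (PySem.Dict.getD (PySem.Dict.mk e) "priority" "LOW" ++
       String.ofList (List.replicate
         (6 - (PySem.Dict.getD (PySem.Dict.mk e) "priority" "LOW").toList.length) ' ')) ++
     " " ++ PySem.Dict.getD (PySem.Dict.mk e) "from" "",
   "           " ++ subj]

-- section(c): filter the emails of category c, header then a flat comprehension of blocks
def bSection (scored_emails : List (List (String × String))) (c : String) : List String :=
  let grp := scored_emails.filter (fun e => bCatOf e == c)
  ["", "  [" ++ c ++ "] (" ++ PySem.Int.toStr (grp.length : Int) ++ ")",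
   "  " ++ String.ofList (List.replicate 40 '─')]
    ++ grp.flatMap bEmailBlock

def format_category_view_alt (scored_emails : List (List (String × String))) : String :=
  let cats := PySem.List.dedup (scored_emails.map bCatOf)   -- list(dict.fromkeys(…))
  let rule := String.ofList (List.replicate 62 '=')
  let out : List String :=
    ["", rule,
     "  INBOX BY CATEGORY  —  " ++ PySem.Int.toStr (scored_emails.length : Int) ++
       " emails in " ++ PySem.Int.toStr (cats.length : Int) ++ " categories",
     rule]
  let out := (PySem.List.sorted2 cats (fun c => c == "Misc") (fun c => c)).foldl
    (fun o c => o ++ bSection scored_emails c) out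
  PySem.Str.join "\n" (out ++ ["", rule])

-- ===== PRECONDITION & SPEC =====
def Spec_format_category_view (scored_emails : List (List (String × String))) (out : String) : Prop := out = format_category_view_alt scored_emails
instance (scored_emails : List (List (String × String))) (out : String) : Decidable (Spec_format_category_view scored_emails out) := by unfold Spec_format_category_view; infer_instance

-- ===== CLAIM (what is proved, stated in full; the proofs are below) =====
def Claim_equal_format_category_view : Prop := ∀ (scored_emails : List (List (String × String))), Dom_format_category_view scored_emails → Spec_format_category_view scored_emails (format_category_view scored_emails)

-- ===== LEMMAS AND PROOFS =====

-- A's dict keys are exactly B's ordered dedup of the category list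
theorem pv_keys_eq (l : List (List (String × String))) :
    (l.foldl (fun d email => d.modify (bCatOf email) [] (fun g => g ++ [email]))
      PySem.Dict.empty).keys = PySem.List.dedup (l.map bCatOf) := by
  rw [PySem.Dict.keys_foldl_modify_key l bCatOf [] (fun _ email g => g ++ [email])]
  simp [PySem.List.dedup_eq_ofList, PySem.Set.update, PySem.Set.ofList_eq_foldl,
    PySem.Dict.keys_empty]

-- A's group for a category is exactly B's filter of the email list
theorem pv_group_eq (l : List (List (String × String))) (c : String) :
    (l.foldl (fun d email => d.modify (bCatOf email) [] (fun g => g ++ [email]))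
      PySem.Dict.empty).getD c [] = l.filter (fun e => bCatOf e == c) := by
  have h := PySem.Dict.getD_foldl_modify_append (l.map (fun e => (bCatOf e, e)))
    (PySem.Dict.empty : PySem.Dict String (List (List (String × String)))) c
  rw [List.foldl_map] at h
  simpa [PySem.Dict.getD_empty, List.filter_map, Function.comp_def] using h

-- A's per-email appended pair of lines is B's email_block (only the truncation `if` is flipped)
theorem pv_email_lines_eq (email : List (String × String)) :
    (let subj := PySem.Dict.getD (PySem.Dict.mk email) "subject" "(no subject)"
     let subj := if 50 < PySem.Str.len subj
                 then PySem.Str.slice subj none (some 47) ++ "..." else subj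
     let sender := PySem.Dict.getD (PySem.Dict.mk email) "from" ""
     let pri := PySem.Dict.getD (PySem.Dict.mk email) "priority" "LOW"
     (["    " ++ (pri ++ String.ofList (List.replicate (6 - pri.toList.length) ' ')) ++
         " " ++ sender,
       "           " ++ subj] : List String))
      = bEmailBlock email := by
  simp only [bEmailBlock]
  by_cases h : PySem.Str.len (PySem.Dict.getD (PySem.Dict.mk email) "subject" "(no subject)") ≤ 50
  · rw [if_pos h, if_neg (by omega)]
  · rw [if_neg h, if_pos (by omega)]

-- A's append loop over the sorted categories, reshaped into B's per-category sections
theorem pv_body_eq (d : PySem.Dict String (List (List (String × String))))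
    (l : List (List (String × String)))
    (hg : ∀ c, d.getD c [] = l.filter (fun e => bCatOf e == c))
    (cs : List String) (acc : List String) :
    cs.foldl (fun ls cat =>
        (d.getD cat []).foldl (fun ls email =>
          let subj := PySem.Dict.getD (PySem.Dict.mk email) "subject" "(no subject)"
          let subj := if 50 < PySem.Str.len subj
                      then PySem.Str.slice subj none (some 47) ++ "..." else subj
          let sender := PySem.Dict.getD (PySem.Dict.mk email) "from" ""
          let pri := PySem.Dict.getD (PySem.Dict.mk email) "priority" "LOW"
          ls ++ ["    " ++ (pri ++ String.ofList (List.replicate (6 - pri.toList.length) ' ')) ++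
                   " " ++ sender,
                 "           " ++ subj])
          (ls ++ ["", "  [" ++ cat ++ "] (" ++ PySem.Int.toStr ((d.getD cat []).length : Int) ++ ")",
                  "  " ++ String.ofList (List.replicate 40 '─')])) acc
      = cs.foldl (fun o c => o ++ bSection l c) acc := by
  induction cs generalizing acc with
  | nil => rfl
  | cons c t ih =>
      rw [List.foldl_cons, List.foldl_cons, ih]
      congr 1
      rw [PySem.List.foldl_append_eq_flatMap]
      simp only [bSection, hg c, List.append_assoc]
      congr 2
      exact List.flatMap_congr (fun e _ => pv_email_lines_eq e)

theorem pv_size_eq_keys_length {κ ν : Type} [BEq κ] (d : PySem.Dict κ ν) :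
    d.size = d.keys.length := by
  simp [PySem.Dict.size, PySem.Dict.keys]

-- ===== VERDICT (by name: the statement is the Claim_ definition above) =====
theorem format_category_view_spec : Claim_equal_format_category_view := by
  intro scored_emails _
  show format_category_view scored_emails = format_category_view_alt scored_emails
  simp only [format_category_view, format_category_view_alt]
  have hcat : ∀ e : List (String × String),
      PySem.Dict.getD (PySem.Dict.mk e) "category" "Misc" = bCatOf e := fun _ => rfl
  simp only [hcat]
  rw [pv_keys_eq, pv_size_eq_keys_length, pv_keys_eq,
      pv_body_eq _ scored_emails (fun c => pv_group_eq scored_emails c)]
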